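-- pv_equiv track=rewrite | github.com/Saketh-Reddy-Bejadi/Python | Practice/Rudolf and 121.py | can_make_zero
-- ===== SOURCE A (Python) =====
-- def can_make_zero(arr, n):
--     operations_needed = [0] * n
--
--     # Calculate the operations needed for each element
--     for i in range(1, n - 1):
--         operations_needed[i] = max(0, arr[i] - arr[i - 1])
--
--     # Perform the operations
--     for i in range(1, n - 1):
--         if arr[i] < operations_needed[i]:
--             return "NO"
--         arr[i] -= operations_needed[i]
--         arr[i + 1] -= operations_needed[i]
--         operations_needed[i + 1] += operations_needed[i] * 2
--
--     # Check if all elements become zero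
--     return "YES" if all(x == 0 for x in arr) else "NO"
-- ===== SOURCE B (Python) =====
-- def can_make_zero(arr, n):
--     # Closed form instead of simulation: the i-th greedy operation count is
--     # op_i = sum_{k<=i} max(0, arr[k]-arr[k-1]) * 2^(i-k), obtained here as a
--     # right shift of one weighted prefix sum; arr is never mutated, the answer
--     # is computed arithmetically against the original values.
--     scaled = [max(0, arr[i] - arr[i - 1]) << (n - 1 - i) for i in range(1, n - 1)]
--     pref = []
--     s = 0
--     for v in scaled:
--         s += v
--         pref.append(s)
--
--     def op(i):
--         return pref[i - 1] >> (n - 1 - i) if 1 <= i <= n - 2 else 0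
--
--     for i in range(1, n - 1):
--         if arr[i] - op(i - 1) < op(i):
--             return "NO"
--     return "YES" if all(arr[j] - op(j) - op(j - 1) == 0 for j in range(len(arr))) else "NO"
-- ===== Notes on version B (the rewrite author's own statement) =====
-- stated objective: alternative
-- what changed: Replaced A's two-pass in-place greedy simulation (mutating arr and an operations_needed table with a doubling carry) by a non-mutating closed-form computation: each operation count op_i is read off as a right shift of a single weighted prefix sum of max(0, arr[k]-arr[k-1]) << (n-1-k), and the failure check and final all-zero check are evaluated arithmetically against the original array.
-- outside the precondition, e.g. on can_make_zero([0, -1], 3): A returns 'NO', B returns 'NO'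
import Mathlib
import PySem

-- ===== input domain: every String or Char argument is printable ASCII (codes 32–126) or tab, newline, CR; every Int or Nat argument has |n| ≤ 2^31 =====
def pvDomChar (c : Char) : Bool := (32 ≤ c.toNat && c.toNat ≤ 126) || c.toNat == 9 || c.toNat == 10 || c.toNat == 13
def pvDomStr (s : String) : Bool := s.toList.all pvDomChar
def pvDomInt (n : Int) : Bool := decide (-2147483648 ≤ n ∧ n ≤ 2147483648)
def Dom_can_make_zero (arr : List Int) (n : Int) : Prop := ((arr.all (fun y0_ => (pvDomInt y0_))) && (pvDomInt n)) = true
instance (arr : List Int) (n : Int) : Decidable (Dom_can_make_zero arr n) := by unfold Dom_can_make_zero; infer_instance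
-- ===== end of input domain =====

-- B replaces A's in-place greedy simulation by a closed-form computation: each
-- operation count is one right shift of a weighted prefix sum, and the answer is
-- read off arithmetically from the ORIGINAL values (objective: alternative).
-- A mutates arr in place, B does not; the equivalence proved is about the return value.

-- ===== PORT A =====
-- shared index helpers: Python xs[i] read (in range under Pre_) and xs[i] = v write
def pvIGet (xs : List Int) (i : Int) : Int := PySem.List.pyGetD xs i 0
def pvISet (xs : List Int) (i : Int) (v : Int) : List Int := PySem.List.pySetD xs i v

-- first loop of A: operations_needed[i] = max(0, arr[i] - arr[i-1])
def pvALoop1 (arr : List Int) (idxs : List Int) (ops : List Int) : List Int :=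
  idxs.foldl (fun ops i => pvISet ops i (max 0 (pvIGet arr i - pvIGet arr (i - 1)))) ops

-- second loop of A, with the early "NO" return as none
def pvALoop2 : List Int → List Int → List Int → Option (List Int)
  | [], arr, _ => some arr
  | i :: rest, arr, ops =>
    let op := pvIGet ops i
    if pvIGet arr i < op then none
    else
      let arr1 := pvISet arr i (pvIGet arr i - op)
      let arr2 := pvISet arr1 (i + 1) (pvIGet arr1 (i + 1) - op)
      let ops2 := pvISet ops (i + 1) (pvIGet ops (i + 1) + op * 2)
      pvALoop2 rest arr2 ops2

def can_make_zero (arr : List Int) (n : Int) : String :=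
  let ops := List.replicate n.toNat 0
  let ops1 := pvALoop1 arr (PySem.List.pyRange 1 (n - 1) 1) ops
  match pvALoop2 (PySem.List.pyRange 1 (n - 1) 1) arr ops1 with
  | none => "NO"
  | some arr2 => if arr2.all (fun x => x == 0) then "YES" else "NO"

-- ===== PORT B =====
-- scaled = [max(0, arr[i] - arr[i-1]) << (n - 1 - i) for i in range(1, n - 1)]
def pvScaled (arr : List Int) (n : Int) : List Int :=
  (PySem.List.pyRange 1 (n - 1) 1).map
    (fun i => max 0 (pvIGet arr i - pvIGet arr (i - 1)) <<< (n - 1 - i).toNat)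

-- the prefix-sum building loop of Source B (p = pref so far, s = running sum)
def pvPrefLoop : List Int → List Int → Int → List Int
  | [], p, _ => p
  | v :: rest, p, s => pvPrefLoop rest (p ++ [s + v]) (s + v)

-- op(i) = pref[i-1] >> (n-1-i) if 1 <= i <= n-2 else 0
def pvOp (pref : List Int) (n : Int) (i : Int) : Int :=
  if 1 ≤ i ∧ i ≤ n - 2 then pvIGet pref (i - 1) >>> (n - 1 - i).toNat else 0

def can_make_zero_alt (arr : List Int) (n : Int) : String :=
  let scaled := pvScaled arr n
  let pref := pvPrefLoop scaled [] 0
  if (PySem.List.pyRange 1 (n - 1) 1).any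
      (fun i => decide (pvIGet arr i - pvOp pref n (i - 1) < pvOp pref n i)) then "NO"
  else if (PySem.List.pyRange 0 (arr.length : Int) 1).all
      (fun j => pvIGet arr j - pvOp pref n j - pvOp pref n (j - 1) == 0) then "YES"
  else "NO"

-- ===== PRECONDITION & SPEC =====
-- Pre_ excludes inputs with 3 ≤ n and arr shorter than n: there A's index accesses
-- arr[i] / arr[i+1] raise IndexError, except on inputs where an early "NO" return
-- preempts the out-of-range access (B returns the same "NO" on those).
def Pre_can_make_zero (arr : List Int) (n : Int) : Prop :=
  n ≤ (arr.length : Int) ∨ n ≤ 2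
instance (arr : List Int) (n : Int) : Decidable (Pre_can_make_zero arr n) := by
  unfold Pre_can_make_zero; infer_instance

def pvWitness_can_make_zero : List Int × Int := ([0, 1, 2], 3)

def Spec_can_make_zero (arr : List Int) (n : Int) (out : String) : Prop := out = can_make_zero_alt arr n
instance (arr : List Int) (n : Int) (out : String) : Decidable (Spec_can_make_zero arr n out) := by unfold Spec_can_make_zero; infer_instance

-- ===== CLAIM (what is proved, stated in full; the proofs are below) =====
def Claim_equal_can_make_zero : Prop := ∀ (arr : List Int) (n : Int), Dom_can_make_zero arr n → Pre_can_make_zero arr n → Spec_can_make_zero arr n (can_make_zero arr n)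

-- ===== LEMMAS AND PROOFS =====

lemma pvISet_length (xs : List Int) (i : Int) (v : Int) :
    (pvISet xs i v).length = xs.length := by
  simp [pvISet, PySem.List.length_pySetD]

lemma pvIGet_pvISet_self (xs : List Int) (i v : Int) (h0 : 0 ≤ i) (h1 : i < (xs.length : Int)) :
    pvIGet (pvISet xs i v) i = v := by
  rw [pvIGet, pvISet, PySem.List.pySetD_of_nonneg xs v h0,
      PySem.List.pyGetD_eq_getElem _ _ h0 (by simpa using h1)]
  rw [List.getElem_set_self (by simp; omega)]

lemma pvIGet_pvISet_ne (xs : List Int) (i m v : Int) (h0 : 0 ≤ i) (hm : 0 ≤ m) (hne : m ≠ i) :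
    pvIGet (pvISet xs i v) m = pvIGet xs m := by
  rw [pvIGet, pvIGet, pvISet, PySem.List.pySetD_of_nonneg xs v h0]
  by_cases hlt : m < (xs.length : Int)
  · rw [PySem.List.pyGetD_eq_getElem _ _ hm (by simp; omega),
        PySem.List.pyGetD_eq_getElem _ _ hm (by simpa using hlt)]
    rw [List.getElem_set_ne]
    omega
  · have h1 : PySem.List.pyGet? (xs.set i.toNat v) m = none := by
      rw [PySem.List.pyGet?_eq_none_iff]
      simp [PySem.Raise.InRange]; omega
    have h2 : PySem.List.pyGet? xs m = none := by
      rw [PySem.List.pyGet?_eq_none_iff]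
      simp [PySem.Raise.InRange]; omega
    simp [PySem.List.pyGetD, h1, h2]

-- characterization of A's first loop
lemma pvALoop1_get (arr : List Int) (e : Int) :
    ∀ (k : Nat) (j : Int) (ops : List Int) (m : Int),
      (e - j).toNat = k → 0 ≤ j → e ≤ (ops.length : Int) → 0 ≤ m →
      pvIGet (pvALoop1 arr (PySem.List.pyRange j e 1) ops) m =
        if j ≤ m ∧ m < e then max 0 (pvIGet arr m - pvIGet arr (m - 1)) else pvIGet ops m := by
  intro k
  induction k with
  | zero =>
    intro j ops m hk hj he hm
    rw [PySem.List.pyRange_one_eq_nil (by omega)]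
    simp [pvALoop1]
    omega
  | succ k ih =>
    intro j ops m hk hj he hm
    have hje : j < e := by omega
    rw [PySem.List.pyRange_one_cons hje]
    have hstep : pvALoop1 arr (j :: PySem.List.pyRange (j + 1) e 1) ops =
        pvALoop1 arr (PySem.List.pyRange (j + 1) e 1)
          (pvISet ops j (max 0 (pvIGet arr j - pvIGet arr (j - 1)))) := by
      simp [pvALoop1]
    rw [hstep, ih (j + 1) _ m (by omega) (by omega) (by rw [pvISet_length]; exact he) hm]
    by_cases hmj : m = j
    · subst hmj
      rw [if_neg (by omega), if_pos ⟨le_refl _, hje⟩]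
      exact pvIGet_pvISet_self ops m _ hj (by omega)
    · rw [pvIGet_pvISet_ne ops j m _ hj hm hmj]
      by_cases hc : j + 1 ≤ m ∧ m < e
      · rw [if_pos hc, if_pos ⟨by omega, hc.2⟩]
      · rw [if_neg hc, if_neg (by omega)]

lemma pvALoop1_length (arr : List Int) (idxs : List Int) :
    ∀ (ops : List Int), (pvALoop1 arr idxs ops).length = ops.length := by
  induction idxs with
  | nil => intro ops; simp [pvALoop1]
  | cons i rest ih =>
    intro ops
    show (pvALoop1 arr rest _).length = _
    rw [ih, pvISet_length]

-- proof-side carry loop (the bridge between A's table loop and B's closed form)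
def pvBLoop (a0 : List Int) : List Int → List Int → Int → Option (List Int)
  | [], arr, _ => some arr
  | i :: rest, arr, carry =>
    let op := max 0 (pvIGet a0 i - pvIGet a0 (i - 1)) + carry
    if pvIGet arr i < op then none
    else
      let arr1 := pvISet arr i (pvIGet arr i - op)
      let arr2 := pvISet arr1 (i + 1) (pvIGet arr1 (i + 1) - op)
      pvBLoop a0 rest arr2 (2 * op)

-- the greedy operation counts as a recurrence (proof-side characterization)
def pvOpSeq (a0 : List Int) : Nat → Int
  | 0 => 0
  | k + 1 => max 0 (pvIGet a0 ((k : Int) + 1) - pvIGet a0 (k : Int)) + 2 * pvOpSeq a0 k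

lemma pvOpSeq_succ (a0 : List Int) (j : Int) (hj : 1 ≤ j) :
    pvOpSeq a0 j.toNat = max 0 (pvIGet a0 j - pvIGet a0 (j - 1)) + 2 * pvOpSeq a0 (j - 1).toNat := by
  have h1 : j.toNat = (j - 1).toNat + 1 := by omega
  rw [h1, pvOpSeq]
  have h2 : (((j - 1).toNat : Int)) + 1 = j := by omega
  have h3 : (((j - 1).toNat : Int)) = j - 1 := by omega
  rw [h2, h3]

-- A's second loop with the table equals the carry loop
lemma pvLoops_eq (a0 : List Int) (e : Int) :
    ∀ (k : Nat) (j : Int) (arr ops : List Int) (carry : Int),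
      (e - j).toNat = k → 1 ≤ j → e ≤ (ops.length : Int) →
      (∀ m, j ≤ m → m < e →
        pvIGet ops m = max 0 (pvIGet a0 m - pvIGet a0 (m - 1)) + (if m = j then carry else 0)) →
      pvALoop2 (PySem.List.pyRange j e 1) arr ops = pvBLoop a0 (PySem.List.pyRange j e 1) arr carry := by
  intro k
  induction k with
  | zero =>
    intro j arr ops carry hk hj he H
    rw [PySem.List.pyRange_one_eq_nil (by omega)]
    simp [pvALoop2, pvBLoop]
  | succ k ih =>
    intro j arr ops carry hk hj he H
    have hje : j < e := by omega
    rw [PySem.List.pyRange_one_cons hje]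
    have hop : pvIGet ops j = max 0 (pvIGet a0 j - pvIGet a0 (j - 1)) + carry := by
      have := H j (le_refl _) hje
      simpa using this
    show pvALoop2 _ _ _ = pvBLoop _ _ _ _
    rw [pvALoop2, pvBLoop, hop]
    by_cases hcond : pvIGet arr j < max 0 (pvIGet a0 j - pvIGet a0 (j - 1)) + carry
    · simp only [if_pos hcond]
    · simp only [if_neg hcond]
      apply ih (j + 1) _ _ _ (by omega) (by omega) (by rw [pvISet_length]; exact he)
      intro m hm1 hm2
      by_cases hmj : m = j + 1
      · subst hmj
        rw [pvIGet_pvISet_self ops (j + 1) _ (by omega) (by omega)]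
        have hprev := H (j + 1) (by omega) hm2
        rw [if_neg (by omega)] at hprev
        rw [if_pos rfl, hprev]
        ring
      · rw [pvIGet_pvISet_ne ops (j + 1) m _ (by omega) (by omega) hmj]
        have := H m (by omega) hm2
        rw [if_neg (by omega)] at this
        rw [this, if_neg hmj]

-- characterization of the carry loop: none ↔ some step fails, and the surviving
-- array is the original minus the applicable operation counts
lemma pvBLoop_char (a0 : List Int) (e : Int) :
    ∀ (k : Nat) (j : Int) (arr : List Int), (e - j).toNat = k → 1 ≤ j → e < (arr.length : Int) →
      (pvBLoop a0 (PySem.List.pyRange j e 1) arr (2 * pvOpSeq a0 (j - 1).toNat) = none ↔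
        ∃ i, j ≤ i ∧ i < e ∧
          pvIGet arr i - (if j < i then pvOpSeq a0 (i - 1).toNat else 0) < pvOpSeq a0 i.toNat) ∧
      (∀ arr2, pvBLoop a0 (PySem.List.pyRange j e 1) arr (2 * pvOpSeq a0 (j - 1).toNat) = some arr2 →
        arr2.length = arr.length ∧ ∀ m : Int, 0 ≤ m →
          pvIGet arr2 m = pvIGet arr m
            - (if j ≤ m ∧ m < e then pvOpSeq a0 m.toNat else 0)
            - (if j ≤ m - 1 ∧ m - 1 < e then pvOpSeq a0 (m - 1).toNat else 0)) := by
  intro k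
  induction k with
  | zero =>
    intro j arr hk hj he
    rw [PySem.List.pyRange_one_eq_nil (by omega)]
    constructor
    · simp only [pvBLoop]
      constructor
      · intro h; exact absurd h (by simp)
      · rintro ⟨i, h1, h2, _⟩; omega
    · intro arr2 h
      simp only [pvBLoop, Option.some.injEq] at h
      subst h
      refine ⟨rfl, ?_⟩
      intro m hm
      rw [if_neg (by omega), if_neg (by omega)]
      ring
  | succ k ih =>
    intro j arr hk hj he
    have hje : j < e := by omega
    rw [PySem.List.pyRange_one_cons hje]
    have hop : max 0 (pvIGet a0 j - pvIGet a0 (j - 1)) + 2 * pvOpSeq a0 (j - 1).toNat =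
        pvOpSeq a0 j.toNat := (pvOpSeq_succ a0 j hj).symm
    rw [pvBLoop, hop]
    by_cases hcond : pvIGet arr j < pvOpSeq a0 j.toNat
    · rw [if_pos hcond]
      constructor
      · constructor
        · intro _
          exact ⟨j, le_refl _, hje, by rw [if_neg (by omega)]; simpa using hcond⟩
        · intro _; rfl
      · intro arr2 h; exact absurd h (by simp)
    · rw [if_neg hcond]
      -- the mutated array after step j
      set arr1 := pvISet arr j (pvIGet arr j - pvOpSeq a0 j.toNat) with harr1
      set arr2' := pvISet arr1 (j + 1) (pvIGet arr1 (j + 1) - pvOpSeq a0 j.toNat) with harr2'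
      have hlen1 : arr2'.length = arr.length := by
        rw [harr2', pvISet_length, harr1, pvISet_length]
      have hgetHigh : ∀ m : Int, 0 ≤ m →
          pvIGet arr2' m = pvIGet arr m - (if m = j ∨ m = j + 1 then pvOpSeq a0 j.toNat else 0) := by
        intro m hm
        by_cases hmj : m = j
        · subst hmj
          rw [harr2', pvIGet_pvISet_ne _ _ _ _ (by omega) hm (by omega), harr1,
              pvIGet_pvISet_self _ _ _ hm (by omega), if_pos (Or.inl rfl)]
        · by_cases hmj1 : m = j + 1
          · subst hmj1
            rw [harr2', pvIGet_pvISet_self _ _ _ (by omega) (by rw [harr1, pvISet_length]; omega),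
                harr1, pvIGet_pvISet_ne _ _ _ _ (by omega) (by omega) (by omega),
                if_pos (Or.inr rfl)]
          · rw [harr2', pvIGet_pvISet_ne _ _ _ _ (by omega) hm hmj1, harr1,
                pvIGet_pvISet_ne _ _ _ _ (by omega) hm hmj, if_neg (by tauto)]
            ring
      have hc2 : 2 * pvOpSeq a0 j.toNat = 2 * pvOpSeq a0 (j + 1 - 1).toNat := by
        norm_num
      rw [hc2]
      obtain ⟨ihN, ihS⟩ := ih (j + 1) arr2' (by omega) (by omega) (by rw [hlen1]; exact he)
      constructor
      · rw [ihN]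
        constructor
        · rintro ⟨i, h1, h2, hc⟩
          refine ⟨i, by omega, h2, ?_⟩
          rw [hgetHigh i (by omega)] at hc
          by_cases hij1 : i = j + 1
          · subst hij1
            rw [if_pos (Or.inr rfl), if_neg (by omega)] at hc
            rw [if_pos (by omega)]
            have : (j + 1 - 1 : Int) = j := by ring
            rw [this]
            linarith
          · rw [if_neg (by omega), if_pos (by omega)] at hc
            rw [if_pos (by omega)]
            linarith
        · rintro ⟨i, h1, h2, hc⟩
          by_cases hij : i = j
          · subst hij
            rw [if_neg (by omega)] at hc
            exact absurd hc (by simpa using hcond)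
          · refine ⟨i, by omega, h2, ?_⟩
            rw [hgetHigh i (by omega)]
            by_cases hij1 : i = j + 1
            · subst hij1
              rw [if_pos (by omega)] at hc
              have hjj : (j + 1 - 1 : Int) = j := by ring
              rw [hjj] at hc
              rw [if_pos (Or.inr rfl), if_neg (by omega)]
              linarith
            · rw [if_pos (by omega)] at hc
              rw [if_neg (by omega), if_pos (by omega)]
              linarith
      · intro arr3 h3
        obtain ⟨hlen3, hpt⟩ := ihS arr3 h3
        refine ⟨by rw [hlen3, hlen1], ?_⟩
        intro m hm
        rw [hpt m hm, hgetHigh m hm]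
        by_cases hmj : m = j
        · subst hmj
          rw [if_pos (Or.inl rfl), if_neg (by omega), if_neg (by omega),
              if_pos (by omega), if_neg (by omega)]
          ring
        · by_cases hmj1 : m = j + 1
          · subst hmj1
            have hjj : (j + 1 - 1 : Int) = j := by ring
            rw [hjj, if_pos (Or.inr rfl)]
            split_ifs <;> omega
          · rw [if_neg (by tauto)]
            have e1 : (if j + 1 ≤ m ∧ m < e then pvOpSeq a0 m.toNat else 0) =
                (if j ≤ m ∧ m < e then pvOpSeq a0 m.toNat else 0) := by
              by_cases hc : j + 1 ≤ m ∧ m < e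
              · rw [if_pos hc, if_pos (by omega)]
              · rw [if_neg hc, if_neg (by omega)]
            have e2 : (if j + 1 ≤ m - 1 ∧ m - 1 < e then pvOpSeq a0 (m - 1).toNat else 0) =
                (if j ≤ m - 1 ∧ m - 1 < e then pvOpSeq a0 (m - 1).toNat else 0) := by
              by_cases hc : j + 1 ≤ m - 1 ∧ m - 1 < e
              · rw [if_pos hc, if_pos (by omega)]
              · rw [if_neg hc, if_neg (by omega)]
            rw [e1, e2]
            ring

-- ===== bridges between B's closed form and pvOpSeq =====

def pvScan : List Int → Int → List Int
  | [], _ => []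
  | v :: rest, s => (s + v) :: pvScan rest (s + v)

lemma pvPrefLoop_eq : ∀ (l p : List Int) (s : Int), pvPrefLoop l p s = p ++ pvScan l s := by
  intro l
  induction l with
  | nil => intro p s; simp [pvPrefLoop, pvScan]
  | cons v rest ih => intro p s; rw [pvPrefLoop, pvScan, ih]; simp

lemma pvScan_get : ∀ (l : List Int) (s : Int) (k : Nat), k < l.length →
    pvIGet (pvScan l s) (k : Int) = s + (l.take (k + 1)).sum := by
  intro l
  induction l with
  | nil => intro s k h; simp at h
  | cons v rest ih =>
    intro s k h
    cases k with
    | zero => simp [pvScan, pvIGet]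
    | succ k =>
      rw [pvScan, pvIGet, PySem.List.pyGetD_natCast]
      have := ih (s + v) k (by simpa using h)
      rw [pvIGet, PySem.List.pyGetD_natCast] at this
      simp only [List.take_succ_cons, List.sum_cons, List.getD_cons_succ]
      rw [this]
      ring

lemma pvShiftCancel (q : Int) (s : Nat) : (2 ^ s * q) >>> s = q := by
  rw [Int.shiftRight_eq_div_pow]
  push_cast
  rw [Int.mul_ediv_cancel_left _ (by positivity)]

lemma pvScaled_length (arr : List Int) (n : Int) :
    (pvScaled arr n).length = (n - 2).toNat := by
  rw [pvScaled, List.length_map, PySem.List.length_pyRange_one]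
  omega

lemma pvScaled_get (arr : List Int) (n : Int) (k : Nat) (hk : k < (n - 2).toNat) :
    pvIGet (pvScaled arr n) (k : Int) =
      max 0 (pvIGet arr (1 + (k : Int)) - pvIGet arr (1 + (k : Int) - 1)) * 2 ^ ((n - 2 - (k : Int)).toNat) := by
  rw [pvScaled, pvIGet, PySem.List.pyGetD_map_pyRange_one _ 1 (n - 1) k 0 (by omega)]
  rw [Int.shiftLeft_eq]
  have : (n - 1 - (1 + (k : Int))).toNat = (n - 2 - (k : Int)).toNat := by omega
  rw [this]

lemma pvPrefSum (arr : List Int) (n : Int) (hn : 3 ≤ n) :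
    ∀ k : Nat, k < (n - 2).toNat →
      ((pvScaled arr n).take (k + 1)).sum = 2 ^ ((n - 2 - (k : Int)).toNat) * pvOpSeq arr (k + 1) := by
  intro k
  induction k with
  | zero =>
    intro hk
    have hlen : 0 < (pvScaled arr n).length := by rw [pvScaled_length]; omega
    rw [List.take_succ, List.take_zero, List.nil_append]
    rw [List.getElem?_eq_getElem hlen]
    have hg := pvScaled_get arr n 0 hk
    rw [pvIGet, PySem.List.pyGetD_eq_getElem _ _ (by omega) (by exact_mod_cast hlen)] at hg
    simp only [Int.toNat_zero, Nat.cast_zero] at hg ⊢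
    simp only [Option.toList_some, List.sum_cons, List.sum_nil, add_zero]
    rw [hg]
    simp [pvOpSeq, pvIGet]
    ring
  | succ k ih =>
    intro hk
    have hk' : k < (n - 2).toNat := by omega
    have hlen : k + 1 < (pvScaled arr n).length := by rw [pvScaled_length]; omega
    rw [List.take_succ, List.sum_append, ih hk']
    rw [List.getElem?_eq_getElem hlen]
    have hg := pvScaled_get arr n (k + 1) hk
    rw [pvIGet, PySem.List.pyGetD_eq_getElem _ _ (by omega) (by push_cast; omega)] at hg
    simp only [Int.toNat_natCast] at hg
    simp only [Option.toList_some, List.sum_cons, List.sum_nil, add_zero]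
    push_cast at hg ⊢
    rw [hg]
    have h1 : (n - 2 - (k : Int)).toNat = (n - 2 - ((k : Int) + 1)).toNat + 1 := by omega
    have hrec : pvOpSeq arr (k + 1 + 1) =
        max 0 (pvIGet arr ((k : Int) + 1 + 1) - pvIGet arr ((k : Int) + 1)) + 2 * pvOpSeq arr (k + 1) := by
      rw [pvOpSeq]
      push_cast
      ring_nf
    have h2 : (1 : Int) + ((k : Int) + 1) - 1 = (k : Int) + 1 := by ring
    have h3 : (1 : Int) + ((k : Int) + 1) = (k : Int) + 1 + 1 := by ring
    rw [h2, h3, h1, hrec]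
    ring

-- B's op() equals pvOpSeq on the window, 0 outside
lemma pvOp_eq (arr : List Int) (n : Int) (hn : 3 ≤ n) (i : Int) :
    pvOp (pvPrefLoop (pvScaled arr n) [] 0) n i =
      if 1 ≤ i ∧ i ≤ n - 2 then pvOpSeq arr i.toNat else 0 := by
  unfold pvOp
  split_ifs with h
  · obtain ⟨h1, h2⟩ := h
    have hik : i - 1 = (((i - 1).toNat : Nat) : Int) := by omega
    have hkl : (i - 1).toNat < (pvScaled arr n).length := by rw [pvScaled_length]; omega
    rw [pvPrefLoop_eq, List.nil_append, hik,
        pvScan_get _ _ _ hkl, zero_add,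
        pvPrefSum arr n hn (i - 1).toNat (by omega)]
    have h3 : (n - 1 - i).toNat = (n - 2 - (((i - 1).toNat : Nat) : Int)).toNat := by omega
    rw [← h3, pvShiftCancel]
    have h4 : i.toNat = (i - 1).toNat + 1 := by omega
    rw [h4]
  · rfl

-- any/all over a pyRange, index-wise
lemma pvAnyRange (a b : Int) (q : Int → Bool) :
    (PySem.List.pyRange a b 1).any q = true ↔ ∃ i, a ≤ i ∧ i < b ∧ q i = true := by
  rw [List.any_eq_true]
  constructor
  · rintro ⟨i, hmem, hq⟩
    rw [PySem.List.mem_pyRange_one] at hmem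
    exact ⟨i, hmem.1, hmem.2, hq⟩
  · rintro ⟨i, h1, h2, hq⟩
    exact ⟨i, PySem.List.mem_pyRange_one.mpr ⟨h1, h2⟩, hq⟩

lemma pvAllRange (a b : Int) (q : Int → Bool) :
    (PySem.List.pyRange a b 1).all q = true ↔ ∀ i, a ≤ i → i < b → q i = true := by
  rw [List.all_eq_true]
  constructor
  · intro H i h1 h2
    exact H i (PySem.List.mem_pyRange_one.mpr ⟨h1, h2⟩)
  · intro H i hmem
    rw [PySem.List.mem_pyRange_one] at hmem
    exact H i hmem.1 hmem.2

lemma pvAllZero (xs : List Int) :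
    (xs.all (fun x => x == 0)) = true ↔
      ∀ m : Int, 0 ≤ m → m < (xs.length : Int) → pvIGet xs m = 0 := by
  rw [List.all_eq_true]
  constructor
  · intro H m h1 h2
    rw [pvIGet, PySem.List.pyGetD_eq_getElem _ _ h1 (by omega)]
    have := H (xs[m.toNat]'(by omega)) (List.getElem_mem _)
    simpa using this
  · intro H x hx
    obtain ⟨k, hk, hxk⟩ := List.mem_iff_getElem.mp hx
    have := H (k : Int) (by omega) (by omega)
    rw [pvIGet, PySem.List.pyGetD_eq_getElem _ _ (by omega) (by omega)] at this
    simp only [Int.toNat_natCast] at this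
    rw [← hxk] at *
    simp [this]

-- ===== VERDICT (by name: the statement is the Claim_ definition above) =====
theorem can_make_zero_spec : Claim_equal_can_make_zero := by
  intro arr n _ hpre
  unfold Spec_can_make_zero can_make_zero can_make_zero_alt
  by_cases hn : n ≤ 2
  · rw [PySem.List.pyRange_one_eq_nil (by omega : n - 1 ≤ 1)]
    have hOP0 : ∀ i : Int, pvOp (pvPrefLoop (pvScaled arr n) [] 0) n i = 0 := by
      intro i; rw [pvOp, if_neg (by omega)]
    have hall : ((PySem.List.pyRange 0 (arr.length : Int) 1).all
        (fun j => pvIGet arr j - pvOp (pvPrefLoop (pvScaled arr n) [] 0) n j -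
          pvOp (pvPrefLoop (pvScaled arr n) [] 0) n (j - 1) == 0)) = (arr.all fun x => x == 0) := by
      rw [Bool.eq_iff_iff, pvAllRange, pvAllZero]
      constructor
      · intro H m h1 h2
        have := H m h1 h2
        rw [hOP0, hOP0] at this
        simpa using this
      · intro H i h1 h2
        rw [hOP0, hOP0]
        have := H i h1 h2
        simp [this]
    simp only [pvALoop2, List.any_nil, Bool.false_eq_true, if_false, hall]
  · have hlen : n ≤ (arr.length : Int) := by
      rcases hpre with h | h
      · exact h
      · omega
    have hOP := pvOp_eq arr n (by omega)
    have hops0 : ((List.replicate n.toNat (0 : Int)).length : Int) = n := by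
      simp; omega
    have hloops : pvALoop2 (PySem.List.pyRange 1 (n - 1) 1) arr
          (pvALoop1 arr (PySem.List.pyRange 1 (n - 1) 1) (List.replicate n.toNat 0)) =
        pvBLoop arr (PySem.List.pyRange 1 (n - 1) 1) arr 0 := by
      apply pvLoops_eq arr (n - 1) ((n - 1) - 1).toNat 1 arr _ 0 rfl (le_refl _)
      · rw [pvALoop1_length, hops0]; omega
      · intro m hm1 hm2
        rw [pvALoop1_get arr (n - 1) ((n - 1) - 1).toNat 1 _ m rfl (by omega)
            (by rw [hops0]; omega) (by omega)]
        rw [if_pos ⟨hm1, hm2⟩]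
        by_cases hmj : m = 1
        · subst hmj; simp
        · rw [if_neg hmj]; ring
    have h0 : (2 : Int) * pvOpSeq arr ((1 : Int) - 1).toNat = 0 := by
      norm_num [pvOpSeq]
    obtain ⟨charN, charS⟩ := pvBLoop_char arr (n - 1) ((n - 1) - 1).toNat 1 arr rfl (le_refl _)
      (by omega)
    rw [h0] at charN charS
    -- translate the per-index failure condition between the two phrasings
    have hcondIff : ∀ i : Int, 1 ≤ i → i < n - 1 →
        ((pvIGet arr i - (if 1 < i then pvOpSeq arr (i - 1).toNat else 0) < pvOpSeq arr i.toNat) ↔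
         (pvIGet arr i - pvOp (pvPrefLoop (pvScaled arr n) [] 0) n (i - 1) <
            pvOp (pvPrefLoop (pvScaled arr n) [] 0) n i)) := by
      intro i h1 h2
      rw [hOP (i - 1), hOP i, if_pos (by omega : 1 ≤ i ∧ i ≤ n - 2)]
      by_cases hi1 : 1 < i
      · rw [if_pos hi1, if_pos (by omega : 1 ≤ i - 1 ∧ i - 1 ≤ n - 2)]
      · rw [if_neg hi1, if_neg (by omega)]
    cases hres : pvBLoop arr (PySem.List.pyRange 1 (n - 1) 1) arr 0 with
    | none =>
      obtain ⟨i, h1, h2, hc⟩ := charN.mp hres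
      have hany : ((PySem.List.pyRange 1 (n - 1) 1).any
          (fun i => decide (pvIGet arr i - pvOp (pvPrefLoop (pvScaled arr n) [] 0) n (i - 1) <
            pvOp (pvPrefLoop (pvScaled arr n) [] 0) n i))) = true := by
        exact pvAnyRange _ _ _ |>.mpr ⟨i, h1, h2, decide_eq_true ((hcondIff i h1 h2).mp hc)⟩
      simp only [hloops, hres, hany, if_true]
    | some arr2 =>
      obtain ⟨hlen2, hpt⟩ := charS arr2 hres
      have hnoex : ¬ ∃ i, 1 ≤ i ∧ i < n - 1 ∧
          pvIGet arr i - (if 1 < i then pvOpSeq arr (i - 1).toNat else 0) < pvOpSeq arr i.toNat := by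
        intro hex
        have := charN.mpr hex
        rw [hres] at this
        cases this
      have hany : ((PySem.List.pyRange 1 (n - 1) 1).any
          (fun i => decide (pvIGet arr i - pvOp (pvPrefLoop (pvScaled arr n) [] 0) n (i - 1) <
            pvOp (pvPrefLoop (pvScaled arr n) [] 0) n i))) = false := by
        apply Bool.eq_false_iff.mpr
        intro hany
        obtain ⟨i, h1, h2, hq⟩ := (pvAnyRange _ _ _).mp hany
        exact hnoex ⟨i, h1, h2, (hcondIff i h1 h2).mpr (of_decide_eq_true hq)⟩
      have hall : (arr2.all fun x => x == 0) = ((PySem.List.pyRange 0 (arr.length : Int) 1).all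
          (fun j => pvIGet arr j - pvOp (pvPrefLoop (pvScaled arr n) [] 0) n j -
            pvOp (pvPrefLoop (pvScaled arr n) [] 0) n (j - 1) == 0)) := by
        rw [Bool.eq_iff_iff, pvAllZero, pvAllRange]
        have hpt' : ∀ m : Int, 0 ≤ m →
            pvIGet arr2 m = pvIGet arr m - pvOp (pvPrefLoop (pvScaled arr n) [] 0) n m -
              pvOp (pvPrefLoop (pvScaled arr n) [] 0) n (m - 1) := by
          intro m hm
          rw [hpt m hm, hOP m, hOP (m - 1)]
          have e1 : (if 1 ≤ m ∧ m < n - 1 then pvOpSeq arr m.toNat else 0) =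
              (if 1 ≤ m ∧ m ≤ n - 2 then pvOpSeq arr m.toNat else 0) := by
            by_cases hc : 1 ≤ m ∧ m < n - 1
            · rw [if_pos hc, if_pos (by omega)]
            · rw [if_neg hc, if_neg (by omega)]
          have e2 : (if 1 ≤ m - 1 ∧ m - 1 < n - 1 then pvOpSeq arr (m - 1).toNat else 0) =
              (if 1 ≤ m - 1 ∧ m - 1 ≤ n - 2 then pvOpSeq arr (m - 1).toNat else 0) := by
            by_cases hc : 1 ≤ m - 1 ∧ m - 1 < n - 1
            · rw [if_pos hc, if_pos (by omega)]
            · rw [if_neg hc, if_neg (by omega)]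
          rw [e1, e2]
        have hl : ((arr2.length : Int)) = (arr.length : Int) := by exact_mod_cast hlen2
        constructor
        · intro H m h1 h2
          have := H m h1 (by omega)
          rw [hpt' m h1] at this
          simp [this]
        · intro H m h1 h2
          rw [hpt' m h1]
          have := H m h1 (by omega)
          simpa using this
      simp only [hloops, hres, hany, Bool.false_eq_true, if_false, hall]
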